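-- pv_equiv track=rewrite | github.com/javirmones/fuzzy-rules | code/elsevier_algorithm.py | comprobar_regla_cubierta
-- ===== SOURCE A (Python) =====
-- def remove_zeros(list_check):
--     new_list = []
--     for x in list_check:
--         if x != 0:
--             new_list.append(x)
--
--     return new_list
--
-- def es_cubierta(regla_check, regla_set):
--     array_check = []
--
--
--     r1 = remove_zeros(regla_check)
--     r2 = remove_zeros(regla_set)
--
--     for x in r1:
--         if x in r2:
--             array_check.append(True)
--         else:
--            array_check.append(False)
--
--     return True if any(array_check) else False
--
-- def comprobar_regla_cubierta(rule, conjunto):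
--     check_list = []
--
--     if len(conjunto) > 0:
--         for x in range(0, len(conjunto)):
--
--             rule_def = conjunto[x][0]
--             check_list.append(es_cubierta(rule, rule_def))
--
--         return True if any(check_list) else False
--     else:
--         return False
-- ===== SOURCE B (Python) =====
-- def comprobar_regla_cubierta(rule, conjunto):
--     if not conjunto:
--         return False
--     union = set()
--     for x in conjunto:
--         union.update(v for v in x[0] if v != 0)
--     return bool({v for v in rule if v != 0} & union)
-- ===== Notes on version B (the rewrite author's own statement) =====
-- stated objective: faster
-- what changed: Replaces A's per-set-rule helper chain (remove_zeros twice, nested list-membership scan, boolean list, any) with one pass that unions all nonzero values of the set rules into a hash set and then tests whether it intersects the nonzero set of rule.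
import Mathlib
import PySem

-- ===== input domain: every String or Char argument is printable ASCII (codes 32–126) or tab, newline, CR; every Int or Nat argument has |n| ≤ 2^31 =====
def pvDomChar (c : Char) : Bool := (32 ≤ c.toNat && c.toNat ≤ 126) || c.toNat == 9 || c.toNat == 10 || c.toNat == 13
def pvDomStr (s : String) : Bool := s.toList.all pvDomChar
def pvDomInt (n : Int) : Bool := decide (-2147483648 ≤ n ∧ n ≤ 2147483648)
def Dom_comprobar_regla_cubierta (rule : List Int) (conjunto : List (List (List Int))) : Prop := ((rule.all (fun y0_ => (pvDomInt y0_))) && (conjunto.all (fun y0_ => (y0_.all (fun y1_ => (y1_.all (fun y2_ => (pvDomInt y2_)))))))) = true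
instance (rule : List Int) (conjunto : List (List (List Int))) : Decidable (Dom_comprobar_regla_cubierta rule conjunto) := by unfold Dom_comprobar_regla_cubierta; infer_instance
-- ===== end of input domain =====

-- B builds one union set of the nonzero values of all set rules and tests intersection with rule's
-- nonzero set, instead of A's per-rule remove_zeros / nested scan / boolean-list / any chain (alternative).

-- ===== PORT A =====
def remove_zeros (list_check : List Int) : List Int :=
  list_check.foldl (fun new_list x => if x ≠ 0 then new_list ++ [x] else new_list) []

def es_cubierta (regla_check regla_set : List Int) : Bool :=
  let r1 := remove_zeros regla_check
  let r2 := remove_zeros regla_set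
  let array_check := r1.foldl (fun acc x => if r2.contains x then acc ++ [true] else acc ++ [false]) []
  if array_check.any id then true else false

def comprobar_regla_cubierta (rule : List Int) (conjunto : List (List (List Int))) : Bool :=
  if conjunto.length > 0 then
    -- conjunto[x][0]; the pyGetD defaults are unreachable under Pre_ (0 ≤ x < len, inner lists nonempty)
    let check_list := (PySem.List.pyRange 0 (conjunto.length : Int) 1).foldl
      (fun acc x => acc ++ [es_cubierta rule (PySem.List.pyGetD (PySem.List.pyGetD conjunto x []) 0 [])]) []
    if check_list.any id then true else false
  else false

-- ===== PORT B =====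
def comprobar_regla_cubierta_alt (rule : List Int) (conjunto : List (List (List Int))) : Bool :=
  if conjunto.isEmpty then false
  else
    let union : PySem.Set Int := conjunto.foldl
      (fun s x => PySem.Set.update s ((PySem.List.pyGetD x 0 []).filter (fun v => v ≠ 0)))
      PySem.Set.empty
    !(PySem.Set.inter (PySem.Set.ofList (rule.filter (fun v => v ≠ 0))) union).isEmpty

-- ===== PRECONDITION & SPEC =====
-- Pre_ excludes conjunto containing an empty set-rule list: there conjunto[x][0] raises IndexError in both Pythons.
def Pre_comprobar_regla_cubierta (rule : List Int) (conjunto : List (List (List Int))) : Prop :=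
  ∀ c ∈ conjunto, c ≠ []
instance (rule : List Int) (conjunto : List (List (List Int))) : Decidable (Pre_comprobar_regla_cubierta rule conjunto) := by unfold Pre_comprobar_regla_cubierta; infer_instance
def pvWitness_comprobar_regla_cubierta : List Int × List (List (List Int)) := ([1, 0, 2], [[[0, 2]], [[3]]])
def Spec_comprobar_regla_cubierta (rule : List Int) (conjunto : List (List (List Int))) (out : Bool) : Prop := out = comprobar_regla_cubierta_alt rule conjunto
instance (rule : List Int) (conjunto : List (List (List Int))) (out : Bool) : Decidable (Spec_comprobar_regla_cubierta rule conjunto out) := by unfold Spec_comprobar_regla_cubierta; infer_instance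

-- ===== CLAIM (what is proved, stated in full; the proofs are below) =====
def Claim_equal_comprobar_regla_cubierta : Prop := ∀ (rule : List Int) (conjunto : List (List (List Int))), Dom_comprobar_regla_cubierta rule conjunto → Pre_comprobar_regla_cubierta rule conjunto → Spec_comprobar_regla_cubierta rule conjunto (comprobar_regla_cubierta rule conjunto)

-- ===== LEMMAS AND PROOFS =====

theorem remove_zeros_eq_filter (l : List Int) :
    remove_zeros l = l.filter (fun x => x ≠ 0) := by
  simpa [remove_zeros] using
    PySem.List.foldl_append_if (fun x : Int => decide (x ≠ 0)) id l []

theorem fold_bools (r1 r2 : List Int) :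
    r1.foldl (fun acc x => if r2.contains x then acc ++ [true] else acc ++ [false]) [] =
      r1.map (fun x => r2.contains x) := by
  rw [show (fun (acc : List Bool) (x : Int) =>
        if r2.contains x then acc ++ [true] else acc ++ [false]) =
      fun acc x => acc ++ [r2.contains x] from by
    funext acc x; by_cases h : x ∈ r2 <;> simp [h]]
  simpa using PySem.List.foldl_append_singleton_eq_map (fun x => r2.contains x) r1 []

theorem es_cubierta_iff (a b : List Int) :
    es_cubierta a b = true ↔ ∃ v ∈ a, v ≠ 0 ∧ v ∈ b := by
  simp only [es_cubierta]
  rw [fold_bools]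
  simp [remove_zeros_eq_filter, List.any_eq_true]
  aesop

theorem mem_union_foldl (conjunto : List (List (List Int))) (s : PySem.Set Int) (y : Int) :
    y ∈ conjunto.foldl
        (fun s x => PySem.Set.update s ((PySem.List.pyGetD x 0 []).filter (fun v => v ≠ 0))) s ↔
      y ∈ s ∨ ∃ c ∈ conjunto, y ∈ (PySem.List.pyGetD c 0 []).filter (fun v => v ≠ 0) := by
  induction conjunto generalizing s with
  | nil => simp
  | cons c cs ih =>
    rw [List.foldl_cons, ih]
    simp [PySem.Set.mem_update]
    tauto

theorem alt_iff (rule : List Int) (conjunto : List (List (List Int))) :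
    comprobar_regla_cubierta_alt rule conjunto = true ↔
      ∃ v ∈ rule, v ≠ 0 ∧ ∃ c ∈ conjunto, v ∈ PySem.List.pyGetD c 0 [] := by
  simp only [comprobar_regla_cubierta_alt]
  by_cases hc : conjunto = []
  · simp [hc]
  · rw [if_neg (by simpa using hc)]
    simp only [Bool.not_eq_true', List.isEmpty_eq_false_iff_exists_mem]
    constructor
    · rintro ⟨v, hv⟩
      rw [PySem.Set.mem_inter] at hv
      obtain ⟨hvr, hvu⟩ := hv
      rw [PySem.Set.mem_ofList, List.mem_filter] at hvr
      rw [mem_union_foldl] at hvu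
      rcases hvu with h | ⟨c, hc2, hvc⟩
      · simp [PySem.Set.empty] at h
      · rw [List.mem_filter] at hvc
        exact ⟨v, hvr.1, by simpa using hvr.2, c, hc2, hvc.1⟩
    · rintro ⟨v, hvr, h0, c, hc2, hvc⟩
      refine ⟨v, ?_⟩
      rw [PySem.Set.mem_inter, PySem.Set.mem_ofList, List.mem_filter, mem_union_foldl]
      exact ⟨⟨hvr, by simpa using h0⟩, Or.inr ⟨c, hc2, List.mem_filter.2 ⟨hvc, by simpa using h0⟩⟩⟩

theorem a_iff (rule : List Int) (conjunto : List (List (List Int))) :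
    comprobar_regla_cubierta rule conjunto = true ↔
      ∃ c ∈ conjunto, ∃ v ∈ rule, v ≠ 0 ∧ v ∈ PySem.List.pyGetD c 0 [] := by
  simp only [comprobar_regla_cubierta]
  by_cases hc : conjunto = []
  · simp [hc]
  · rw [if_pos (by simpa [List.length_pos_iff] using hc)]
    rw [PySem.List.foldl_pyRange_zero_pyGetD' conjunto ([] : List (List Int))
      (fun acc c => acc ++ [es_cubierta rule (PySem.List.pyGetD c 0 [])]) []]
    rw [PySem.List.foldl_append_singleton_eq_map]
    simp [List.any_eq_true, es_cubierta_iff]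

-- ===== VERDICT (by name: the statement is the Claim_ definition above) =====
theorem comprobar_regla_cubierta_spec : Claim_equal_comprobar_regla_cubierta := by
  intro rule conjunto _ _
  unfold Spec_comprobar_regla_cubierta
  rw [Bool.eq_iff_iff, a_iff, alt_iff]
  constructor
  · rintro ⟨c, hc, v, hv, h0, hvc⟩; exact ⟨v, hv, h0, c, hc, hvc⟩
  · rintro ⟨v, hv, h0, c, hc, hvc⟩; exact ⟨c, hc, v, hv, h0, hvc⟩
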